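-- pv_equiv track=rewrite | github.com/jonathantsang/CompetitiveProgramming | codeforces/c649/a/a.py | solve
-- ===== SOURCE A (Python) =====
-- def solve(N,x,arr):
-- 	best = 0
--
-- 	sumsofar = 0
-- 	for i in range(N):
-- 		sumsofar += arr[i]
-- 		if sumsofar % x != 0:
-- 			best = max(best, i+1)
-- 	sumsofar = 0
-- 	for i in range(N-1, -1, -1):
-- 		sumsofar += arr[i]
-- 		if sumsofar % x != 0:
-- 			best = max(best, (N-1-i)+1)
--
-- 	if best == 0:
-- 		return -1
-- 	return best
-- ===== SOURCE B (Python) =====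
-- def solve(N, x, arr):
--     if N <= 0:
--         return -1
--     a = arr[:N]
--     if sum(a) % x != 0:
--         return N
--     l = r = -1
--     for i, v in enumerate(a):
--         if v % x != 0:
--             r = i
--             if l < 0:
--                 l = i
--     if l < 0:
--         return -1
--     return max(r, N - 1 - l)
-- ===== Notes on version B (the rewrite author's own statement) =====
-- stated objective: alternative
-- what changed: Replaces A's two running prefix/suffix-sum accumulation loops by a single pass over element divisibility: if the total sum is not divisible by x the answer is N, otherwise it is max(r, N-1-l) for the leftmost l and rightmost r elements not divisible by x.
import Mathlib
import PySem

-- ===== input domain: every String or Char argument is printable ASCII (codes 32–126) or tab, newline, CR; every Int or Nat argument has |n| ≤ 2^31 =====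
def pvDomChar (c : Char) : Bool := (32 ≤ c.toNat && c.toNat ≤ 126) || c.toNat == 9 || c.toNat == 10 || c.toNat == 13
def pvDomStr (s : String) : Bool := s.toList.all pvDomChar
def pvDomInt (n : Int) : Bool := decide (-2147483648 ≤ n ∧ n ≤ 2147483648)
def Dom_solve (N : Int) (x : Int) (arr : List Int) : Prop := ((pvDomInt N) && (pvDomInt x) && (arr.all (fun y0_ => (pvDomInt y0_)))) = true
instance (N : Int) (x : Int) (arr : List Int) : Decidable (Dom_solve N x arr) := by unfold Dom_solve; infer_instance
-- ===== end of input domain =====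

-- B computes the answer from the divisibility of the total and the positions of the
-- leftmost/rightmost element not divisible by x, instead of A's two running-sum loops.

-- ===== PORT A =====
def solve (N : Int) (x : Int) (arr : List Int) : Int :=
  let p := (PySem.List.pyRange 0 N 1).foldl
    (fun (st : Int × Int) i =>
      let s := st.2 + PySem.List.pyGetD arr i 0
      (if PySem.Int.mod s x ≠ 0 then max st.1 (i + 1) else st.1, s)) (0, 0)
  let q := (PySem.List.pyRange (N - 1) (-1) (-1)).foldl
    (fun (st : Int × Int) i =>
      let s := st.2 + PySem.List.pyGetD arr i 0
      (if PySem.Int.mod s x ≠ 0 then max st.1 ((N - 1 - i) + 1) else st.1, s)) (p.1, 0)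
  if q.1 = 0 then -1 else q.1

-- ===== PORT B =====
def solve_alt (N : Int) (x : Int) (arr : List Int) : Int :=
  if N ≤ 0 then -1
  else
    let a := PySem.List.slice arr none (some N)
    if PySem.Int.mod a.sum x ≠ 0 then N
    else
      let lr := (PySem.List.enumerate a 0).foldl
        (fun (st : Int × Int) iv =>
          if PySem.Int.mod iv.2 x ≠ 0 then
            ((if st.1 < 0 then iv.1 else st.1), iv.1)
          else st) (-1, -1)
      if lr.1 < 0 then -1 else max lr.2 (N - 1 - lr.1)

-- ===== PRECONDITION & SPEC =====
-- Pre_ excludes exactly the inputs where A raises: IndexError when N exceeds len(arr),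
-- ZeroDivisionError when x = 0 and at least one loop iteration runs (0 < N).
def Pre_solve (N : Int) (x : Int) (arr : List Int) : Prop :=
  N ≤ (arr.length : Int) ∧ (0 < N → x ≠ 0)
instance (N : Int) (x : Int) (arr : List Int) : Decidable (Pre_solve N x arr) := by
  unfold Pre_solve; infer_instance

def pvWitness_solve : Int × Int × List Int := (4, 3, [1, 2, 3, 6])

def Spec_solve (N : Int) (x : Int) (arr : List Int) (out : Int) : Prop := out = solve_alt N x arr
instance (N : Int) (x : Int) (arr : List Int) (out : Int) : Decidable (Spec_solve N x arr out) := by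
  unfold Spec_solve; infer_instance

-- ===== CLAIM (what is proved, stated in full; the proofs are below) =====
def Claim_equal_solve : Prop := ∀ (N : Int) (x : Int) (arr : List Int),
  Dom_solve N x arr → Pre_solve N x arr → Spec_solve N x arr (solve N x arr)

-- ===== LEMMAS AND PROOFS =====

-- prefix sum of the first k elements
def psum (arr : List Int) (k : Nat) : Int := (arr.take k).sum

-- A's first loop as structural recursion on the iteration count
def loop1 (arr : List Int) (x : Int) : Nat → Int × Int
  | 0 => (0, 0)
  | k + 1 =>
      let st := loop1 arr x k
      let s := st.2 + arr.getD k 0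
      (if PySem.Int.mod s x ≠ 0 then max st.1 ((k : Int) + 1) else st.1, s)

-- A's second loop (indices j-1, j-2, …, 0) as structural recursion
def loop2 (arr : List Int) (x N : Int) : Nat → Int × Int → Int × Int
  | 0, st => st
  | j + 1, st =>
      let s := st.2 + arr.getD j 0
      loop2 arr x N j
        (if PySem.Int.mod s x ≠ 0 then max st.1 ((N - 1 - (j : Int)) + 1) else st.1, s)

lemma psum_zero (arr : List Int) : psum arr 0 = 0 := rfl

lemma psum_succ (arr : List Int) (k : Nat) :
    psum arr (k + 1) = psum arr k + arr.getD k 0 := by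
  simp [psum, List.take_add_one, List.getD_eq_getElem?_getD]
  cases h : arr[k]? <;> simp

lemma loop1_eq (arr : List Int) (x : Int) (n : Nat) :
    (PySem.List.pyRange 0 (n : Int) 1).foldl
      (fun (st : Int × Int) i =>
        let s := st.2 + PySem.List.pyGetD arr i 0
        (if PySem.Int.mod s x ≠ 0 then max st.1 (i + 1) else st.1, s)) (0, 0)
    = loop1 arr x n := by
  induction n with
  | zero => simp [PySem.List.pyRange_one_eq_nil, loop1]
  | succ k ih =>
      have h : ((k : Int) + 1) = ((k + 1 : Nat) : Int) := by push_cast; ring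
      rw [← h, PySem.List.pyRange_one_succ_right (by positivity : (0:Int) ≤ (k:Int)),
        List.foldl_append, ih]
      simp [loop1]

lemma loop2_eq (arr : List Int) (x N : Int) (j : Nat) (st : Int × Int) :
    (PySem.List.pyRange ((j : Int) - 1) (-1) (-1)).foldl
      (fun (st : Int × Int) i =>
        let s := st.2 + PySem.List.pyGetD arr i 0
        (if PySem.Int.mod s x ≠ 0 then max st.1 ((N - 1 - i) + 1) else st.1, s)) st
    = loop2 arr x N j st := by
  induction j generalizing st with
  | zero => simp [PySem.List.pyRange_neg_one_eq_nil, loop2]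
  | succ k ih =>
      have h : ((k + 1 : Nat) : Int) - 1 = (k : Int) := by push_cast; ring
      rw [h, PySem.List.pyRange_neg_one_cons (by omega : (-1:Int) < (k:Int)), List.foldl_cons]
      simp only [loop2]
      rw [← ih]
      simp

lemma loop1_bounds (arr : List Int) (x : Int) (k : Nat) :
    0 ≤ (loop1 arr x k).1 ∧ (loop1 arr x k).1 ≤ (k : Int) := by
  induction k with
  | zero => simp [loop1]
  | succ m ih =>
      simp only [loop1]
      split_ifs
      · constructor <;> [positivity; skip]
        omega
      · push_cast
        omega

lemma loop1_sum (arr : List Int) (x : Int) (k : Nat) :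
    (loop1 arr x k).2 = psum arr k := by
  induction k with
  | zero => simp [loop1, psum_zero]
  | succ m ih => simp only [loop1]; rw [psum_succ, ih]

lemma loop1_all_dvd (arr : List Int) (x : Int) (k : Nat)
    (h : ∀ j, j ≤ k → x ∣ psum arr j) : (loop1 arr x k).1 = 0 := by
  induction k with
  | zero => rfl
  | succ m ih =>
      simp only [loop1]
      rw [loop1_sum, ← psum_succ]
      rw [if_neg]
      · exact ih fun j hj => h j (by omega)
      · simp [PySem.Int.mod_eq_zero_iff_dvd]
        exact h (m + 1) le_rfl

lemma loop1_top (arr : List Int) (x : Int) (r : Nat) (hr1 : 1 ≤ r)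
    (hr : ¬ x ∣ psum arr r) :
    ∀ m, r ≤ m → (∀ j, r < j → j ≤ m → x ∣ psum arr j) →
      (loop1 arr x m).1 = (r : Int) := by
  intro m
  induction m with
  | zero => omega
  | succ k ih =>
      intro hle hstab
      by_cases hk : r ≤ k
      · -- step k+1 > r: sum divisible, state unchanged
        simp only [loop1]
        rw [loop1_sum, ← psum_succ, if_neg]
        · exact ih hk fun j h1 h2 => hstab j h1 (by omega)
        · simp [PySem.Int.mod_eq_zero_iff_dvd]
          exact hstab (k + 1) (by omega) le_rfl
      · -- k+1 = r: the candidate r wins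
        have hkr : k + 1 = r := by omega
        simp only [loop1]
        rw [loop1_sum, ← psum_succ, hkr, if_pos]
        · have := (loop1_bounds arr x k).2
          have h2 : ((k : Int) + 1) = (r : Int) := by omega
          rw [h2]
          omega
        · simp [PySem.Int.mod_eq_zero_iff_dvd]
          exact hr

lemma loop2_const (arr : List Int) (x N : Int) (j : Nat) :
    ∀ b s, N ≤ b → (loop2 arr x N j (b, s)).1 = b := by
  induction j with
  | zero => intro b s _; rfl
  | succ k ih =>
      intro b s hb
      simp only [loop2]
      split_ifs
      · have : max b (N - 1 - (k : Int) + 1) = b := by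
          have : (0:Int) ≤ (k : Int) := by positivity
          omega
        rw [this]
        exact ih b _ hb
      · exact ih b _ hb

lemma loop2_skip (arr : List Int) (x N : Int) (n : Nat) (hS : x ∣ psum arr n) :
    ∀ j, (∀ i, i < j → x ∣ psum arr i) → ∀ b,
      loop2 arr x N j (b, psum arr n - psum arr j) = (b, psum arr n) := by
  intro j
  induction j with
  | zero => intro _ b; simp [loop2, psum_zero]
  | succ k ih =>
      intro h b
      simp only [loop2]
      have hs : psum arr n - psum arr (k + 1) + arr.getD k 0 = psum arr n - psum arr k := by
        rw [psum_succ]; ring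
      rw [hs, if_neg]
      · exact ih (fun i hi => h i (by omega)) b
      · simp [PySem.Int.mod_eq_zero_iff_dvd]
        exact dvd_sub hS (h k (by omega))

lemma loop2_main (arr : List Int) (x N : Int) (n l : Nat) (hS : x ∣ psum arr n)
    (hl1 : ¬ x ∣ psum arr (l + 1)) (hbefore : ∀ i, i ≤ l → x ∣ psum arr i) :
    ∀ j, l + 2 ≤ j → ∀ b,
      loop2 arr x N j (b, psum arr n - psum arr j)
        = (max b (N - 1 - (l : Int)), psum arr n) := by
  intro j
  induction j with
  | zero => omega
  | succ k ih =>
      intro hj b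
      simp only [loop2]
      have hs : psum arr n - psum arr (k + 1) + arr.getD k 0 = psum arr n - psum arr k := by
        rw [psum_succ]; ring
      rw [hs]
      by_cases hk : l + 2 ≤ k
      · -- recurse; the candidate (if any) is dominated by N - 1 - l
        by_cases hd : x ∣ psum arr k
        · rw [if_neg (by simp only [ne_eq, PySem.Int.mod_eq_zero_iff_dvd, not_not]; exact dvd_sub hS hd)]
          exact ih hk b
        · rw [if_pos (by simp only [ne_eq, PySem.Int.mod_eq_zero_iff_dvd]
                         exact fun h => hd (by simpa [sub_sub_cancel] using dvd_sub hS h))]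
          rw [ih hk (max b (N - 1 - (k : Int) + 1))]
          have hcand : N - 1 - (k : Int) + 1 ≤ N - 1 - (l : Int) := by
            have : (l : Int) + 2 ≤ (k : Int) := by exact_mod_cast hk
            omega
          have : max (max b (N - 1 - (k : Int) + 1)) (N - 1 - (l : Int))
              = max b (N - 1 - (l : Int)) := by omega
          rw [this]
      · -- k + 1 = l + 2, i.e. k = l + 1 : the candidate N - 1 - l fires
        have hkl : k = l + 1 := by omega
        subst hkl
        rw [if_pos (by simp only [ne_eq, PySem.Int.mod_eq_zero_iff_dvd]
                       exact fun h => hl1 (by simpa [sub_sub_cancel] using dvd_sub hS h))]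
        have hc : N - 1 - ((l + 1 : Nat) : Int) + 1 = N - 1 - (l : Int) := by
          push_cast; ring
        rw [hc, loop2_skip arr x N n hS (l + 1) (fun i hi => hbefore i (by omega)) _]

-- B's fold over enumerate: when every element is a multiple of x, nothing changes
lemma bfold_skip (x : Int) (cs : List Int) (h : ∀ v ∈ cs, x ∣ v) :
    ∀ (s : Int) (st : Int × Int),
      (PySem.List.enumerate cs s).foldl
        (fun (st : Int × Int) iv =>
          if PySem.Int.mod iv.2 x ≠ 0 then
            ((if st.1 < 0 then iv.1 else st.1), iv.1)
          else st) st = st := by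
  induction cs with
  | nil => intro s st; simp [PySem.List.enumerate_nil]
  | cons v t ih =>
      intro s st
      rw [PySem.List.enumerate_cons, List.foldl_cons]
      rw [if_neg (by simp [PySem.Int.mod_eq_zero_iff_dvd]; exact h v (by simp))]
      exact ih (fun w hw => h w (by simp [hw])) (s + 1) st

-- once st.1 ≥ 0 it never changes; st.2 ends at the absolute position of the
-- last element not divisible by x
lemma bfold_after (x : Int) (cs : List Int) :
    ∀ (r : Nat) (hr : r < cs.length), ¬ x ∣ cs[r] →
      (∀ i (_ : i < cs.length), r < i → x ∣ cs[i]) →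
      ∀ (s b t : Int), 0 ≤ b →
        (PySem.List.enumerate cs s).foldl
          (fun (st : Int × Int) iv =>
            if PySem.Int.mod iv.2 x ≠ 0 then
              ((if st.1 < 0 then iv.1 else st.1), iv.1)
            else st) (b, t) = (b, s + r) := by
  induction cs with
  | nil => intro r hr; simp at hr
  | cons v t ih =>
      intro r hr hvr hafter s b tt hb
      rw [PySem.List.enumerate_cons, List.foldl_cons]
      match r with
      | 0 =>
          rw [if_pos (by simpa [PySem.Int.mod_eq_zero_iff_dvd] using hvr)]
          rw [if_neg (by omega)]
          rw [bfold_skip x t (fun w hw => by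
            obtain ⟨i, hi, rfl⟩ := List.mem_iff_getElem.mp hw
            have := hafter (i + 1) (by simpa using hi) (by omega)
            simpa using this)]
          simp
      | rr + 1 =>
          have step : ∀ t1 : Int,
              (PySem.List.enumerate t (s + 1)).foldl
                (fun (st : Int × Int) iv =>
                  if PySem.Int.mod iv.2 x ≠ 0 then
                    ((if st.1 < 0 then iv.1 else st.1), iv.1)
                  else st) (b, t1) = (b, s + ((rr + 1 : Nat) : Int)) := by
            intro t1
            have h := ih rr (by simpa using hr) (by simpa using hvr)
              (fun i hi hri => by
                have := hafter (i + 1) (by simpa using hi) (by omega)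
                simpa using this) (s + 1) b t1 hb
            rw [h]
            rw [Prod.mk.injEq]
            refine ⟨rfl, by push_cast; ring⟩
          by_cases hv : x ∣ v
          · rw [if_neg (by simpa [PySem.Int.mod_eq_zero_iff_dvd] using hv)]
            exact step tt
          · rw [if_pos (by simpa [PySem.Int.mod_eq_zero_iff_dvd] using hv)]
            rw [if_neg (by omega)]
            exact step s

lemma bfold_main (x : Int) (cs : List Int) :
    ∀ (l r : Nat) (hlr : l ≤ r) (hr : r < cs.length),
      ¬ x ∣ cs[l]'(by omega) → ¬ x ∣ cs[r] →
      (∀ i (_ : i < cs.length), i < l → x ∣ cs[i]) →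
      (∀ i (_ : i < cs.length), r < i → x ∣ cs[i]) →
      ∀ s : Int, 0 ≤ s →
        (PySem.List.enumerate cs s).foldl
          (fun (st : Int × Int) iv =>
            if PySem.Int.mod iv.2 x ≠ 0 then
              ((if st.1 < 0 then iv.1 else st.1), iv.1)
            else st) (-1, -1) = (s + l, s + r) := by
  induction cs with
  | nil => intro l r hlr hr; simp at hr
  | cons v t ih =>
      intro l r hlr hr hl hvr hbefore hafter s hs
      rw [PySem.List.enumerate_cons, List.foldl_cons]
      match l with
      | 0 =>
          rw [if_pos (by simpa [PySem.Int.mod_eq_zero_iff_dvd] using hl)]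
          rw [if_pos (by omega)]
          match r with
          | 0 =>
              rw [bfold_skip x t (fun w hw => by
                obtain ⟨i, hi, rfl⟩ := List.mem_iff_getElem.mp hw
                have := hafter (i + 1) (by simpa using hi) (by omega)
                simpa using this)]
              simp
          | rr + 1 =>
              have := bfold_after x t rr (by simpa using hr) (by simpa using hvr)
                (fun i hi hri => by
                  have := hafter (i + 1) (by simpa using hi) (by omega)
                  simpa using this) (s + 1) s s hs
              rw [this]
              rw [Prod.mk.injEq]
              refine ⟨by push_cast; ring, by push_cast; ring⟩
      | ll + 1 =>
          have hrr : ∃ rr, r = rr + 1 := ⟨r - 1, by omega⟩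
          obtain ⟨rr, rfl⟩ := hrr
          rw [if_neg (by
            have := hbefore 0 (by simp) (by omega)
            simpa [PySem.Int.mod_eq_zero_iff_dvd] using this)]
          have := ih ll rr (by omega) (by simpa using hr) (by simpa using hl)
            (by simpa using hvr)
            (fun i hi hli => by
              have := hbefore (i + 1) (by simpa using hi) (by omega)
              simpa using this)
            (fun i hi hri => by
              have := hafter (i + 1) (by simpa using hi) (by omega)
              simpa using this) (s + 1) (by omega)
          rw [this]
          rw [Prod.mk.injEq]
          constructor <;> (push_cast; ring)

-- divisibility of a block sum from divisibility of its elements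
lemma dvd_psum_of_elems (x : Int) (arr : List Int) (k : Nat)
    (h : ∀ i, i < k → x ∣ arr.getD i 0) : x ∣ psum arr k := by
  induction k with
  | zero => simp [psum_zero]
  | succ m ih =>
      rw [psum_succ]
      exact dvd_add (ih fun i hi => h i (by omega)) (h m (by omega))

lemma dvd_psum_sub_of_elems (x : Int) (arr : List Int) (n k : Nat) (hk : k ≤ n)
    (h : ∀ i, k ≤ i → i < n → x ∣ arr.getD i 0) :
    x ∣ psum arr n - psum arr k := by
  induction n with
  | zero => interval_cases k; simp [psum_zero]
  | succ m ih =>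
      by_cases hkm : k ≤ m
      · have : psum arr (m + 1) - psum arr k
            = (psum arr m - psum arr k) + arr.getD m 0 := by rw [psum_succ]; ring
        rw [this]
        exact dvd_add (ih hkm fun i h1 h2 => h i h1 (by omega)) (h m (by omega) (by omega))
      · have : k = m + 1 := by omega
        subst this
        simp

-- ===== VERDICT (by name: the statement is the Claim_ definition above) =====
theorem solve_spec : Claim_equal_solve := by
  intro N x arr _ hpre
  obtain ⟨hlen, hx0⟩ := hpre
  unfold Spec_solve
  by_cases hN : N ≤ 0
  · -- both loops empty; both return -1
    simp only [solve, solve_alt, if_pos hN]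
    rw [PySem.List.pyRange_one_eq_nil hN, PySem.List.pyRange_neg_one_eq_nil (by omega)]
    simp
  · replace hN : 0 < N := by omega
    have hx : x ≠ 0 := hx0 hN
    obtain ⟨n, hn⟩ : ∃ n : Nat, N = (n : Int) := ⟨N.toNat, by omega⟩
    subst hn
    have hn1 : 1 ≤ n := by exact_mod_cast hN
    have hlen' : n ≤ arr.length := by exact_mod_cast hlen
    -- rewrite A into loop1 / loop2
    rw [solve]
    simp only []
    rw [loop1_eq arr x n]
    have h2 : (PySem.List.pyRange ((n : Int) - 1) (-1) (-1)).foldl _ ((loop1 arr x n).1, 0)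
        = loop2 arr x n n ((loop1 arr x n).1, 0) := loop2_eq arr x (n : Int) n _
    rw [h2]
    -- rewrite B
    rw [solve_alt, if_neg (show ¬ (n : Int) ≤ 0 by omega)]
    simp only [PySem.List.slice_to_natCast]
    have hsum : (arr.take n).sum = psum arr n := rfl
    rw [hsum]
    by_cases hS : x ∣ psum arr n
    · rw [if_neg (show ¬ PySem.Int.mod (psum arr n) x ≠ 0 by
        simpa [PySem.Int.mod_eq_zero_iff_dvd] using hS)]
      by_cases hex : ∃ i, i < n ∧ ¬ x ∣ arr.getD i 0
      · -- some element is not a multiple of x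
        classical
        set l := Nat.find hex with hldef
        have hlspec := Nat.find_spec hex
        have hlmin : ∀ i, i < l → x ∣ arr.getD i 0 := fun i hi => by
          by_contra hc
          exact Nat.find_min hex hi ⟨by omega, hc⟩
        set P : Nat → Prop := fun i => ¬ x ∣ arr.getD i 0 with hPdef
        have hPl : P l := hlspec.2
        set r := Nat.findGreatest P (n - 1) with hrdef
        have hln : l ≤ n - 1 := by omega
        have hPr : P r := Nat.findGreatest_spec hln hPl
        have hrle : r ≤ n - 1 := Nat.findGreatest_le _
        have hlr : l ≤ r := Nat.le_findGreatest hln hPl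
        have hrmax : ∀ i, r < i → i < n → x ∣ arr.getD i 0 := fun i hri hin => by
          by_contra hc
          exact (Nat.findGreatest_is_greatest hri (by omega)) hc
        -- l < r strictly: otherwise the total sum could not be divisible by x
        have hlltr : l < r := by
          rcases Nat.lt_or_ge l r with h | h
          · exact h
          · exfalso
            have hle : l = r := by omega
            have h1 : x ∣ psum arr n - psum arr (l + 1) :=
              dvd_psum_sub_of_elems x arr n (l + 1) (by omega)
                (fun i h1 h2 => hrmax i (by omega) h2)
            have h2 : x ∣ psum arr l := dvd_psum_of_elems x arr l hlmin
            have h3 : x ∣ psum arr (l + 1) := by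
              simpa [sub_sub_cancel] using dvd_sub hS h1
            rw [psum_succ] at h3
            exact hlspec.2 ((dvd_add_right h2).mp h3)
        -- A-side values
        have hpsr : ¬ x ∣ psum arr r := by
          intro hc
          have h1 : x ∣ psum arr n - psum arr (r + 1) :=
            dvd_psum_sub_of_elems x arr n (r + 1) (by omega)
              (fun i h1 h2 => hrmax i (by omega) h2)
          have h3 : x ∣ psum arr (r + 1) := by
            simpa [sub_sub_cancel] using dvd_sub hS h1
          rw [psum_succ] at h3
          exact hPr ((dvd_add_right hc).mp h3)
        have hstab : ∀ j, r < j → j ≤ n → x ∣ psum arr j := fun j h1 h2 => by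
          have := dvd_psum_sub_of_elems x arr n j h2 (fun i hi1 hi2 => hrmax i (by omega) hi2)
          simpa [sub_sub_cancel] using dvd_sub hS this
        have hL1 : (loop1 arr x n).1 = (r : Int) :=
          loop1_top arr x r (by omega) hpsr n (by omega) hstab
        have hpsl1 : ¬ x ∣ psum arr (l + 1) := by
          rw [psum_succ]
          intro hc
          exact hlspec.2 ((dvd_add_right (dvd_psum_of_elems x arr l hlmin)).mp hc)
        have hbef : ∀ i, i ≤ l → x ∣ psum arr i := fun i hi =>
          dvd_psum_of_elems x arr i (fun j hj => hlmin j (by omega))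
        have hzero : psum arr n - psum arr n = 0 := by ring
        have hL2 : loop2 arr x (n : Int) n ((r : Int), 0)
            = (max (r : Int) ((n : Int) - 1 - (l : Int)), psum arr n) := by
          have := loop2_main arr x (n : Int) n l hS hpsl1 hbef n (by omega) (r : Int)
          rwa [hzero] at this
        rw [hL1, hL2]
        -- B side
        have hlenT : (arr.take n).length = n := by simp [List.length_take]; omega
        have hgetl : (arr.take n)[l]'(by omega) = arr.getD l 0 := by
          rw [List.getElem_take, List.getD_eq_getElem?_getD, List.getElem?_eq_getElem (by omega)]
          rfl
        have hgetr : (arr.take n)[r]'(by omega) = arr.getD r 0 := by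
          rw [List.getElem_take, List.getD_eq_getElem?_getD, List.getElem?_eq_getElem (by omega)]
          rfl
        have hB := bfold_main x (arr.take n) l r (by omega) (by omega)
          (by rw [hgetl]; exact hlspec.2) (by rw [hgetr]; exact hPr)
          (fun i hi hil => by
            have : (arr.take n)[i] = arr.getD i 0 := by
              rw [List.getElem_take, List.getD_eq_getElem?_getD,
                List.getElem?_eq_getElem (by omega)]
              rfl
            rw [this]; exact hlmin i hil)
          (fun i hi hri => by
            have : (arr.take n)[i] = arr.getD i 0 := by
              rw [List.getElem_take, List.getD_eq_getElem?_getD,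
                List.getElem?_eq_getElem (by omega)]
              rfl
            rw [this]; exact hrmax i hri (by omega))
          0 le_rfl
        rw [hB]
        simp only [zero_add]
        have hmax : ¬ (max (r : Int) ((n : Int) - 1 - (l : Int))) = 0 := by
          have : (1 : Int) ≤ (r : Int) := by exact_mod_cast hlltr.trans_le' (by omega)
          omega
        rw [if_neg hmax, if_neg (show ¬ ((l : Int) < 0) by omega)]
      · -- every element is a multiple of x: both return -1
        have hex' : ∀ i, i < n → x ∣ arr.getD i 0 := fun i hi => by
          by_contra hc
          exact hex ⟨i, hi, hc⟩
        have hall : ∀ j, j ≤ n → x ∣ psum arr j := fun j hj =>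
          dvd_psum_of_elems x arr j (fun i hi => hex' i (by omega))
        have hL1 : (loop1 arr x n).1 = 0 := loop1_all_dvd arr x n hall
        have hzero : psum arr n - psum arr n = 0 := by ring
        have hL2 : loop2 arr x (n : Int) n (0, 0) = (0, psum arr n) := by
          have := loop2_skip arr x (n : Int) n hS n (fun i hi => hall i (by omega)) 0
          rwa [hzero] at this
        rw [hL1, hL2]
        rw [bfold_skip x (arr.take n) (fun w hw => by
          obtain ⟨i, hi, rfl⟩ := List.mem_iff_getElem.mp hw
          have hi' : i < n := by simp [List.length_take] at hi; omega
          have : (arr.take n)[i] = arr.getD i 0 := by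
            rw [List.getElem_take, List.getD_eq_getElem?_getD,
              List.getElem?_eq_getElem (by omega)]
            rfl
          rw [this]; exact hex' i hi') 0 (-1, -1)]
        simp
    · -- total not divisible: A's best is N, B returns N
      rw [if_pos (show PySem.Int.mod (psum arr n) x ≠ 0 by
        simpa [PySem.Int.mod_eq_zero_iff_dvd] using hS)]
      have hL1 : (loop1 arr x n).1 = (n : Int) :=
        loop1_top arr x n hn1 hS n le_rfl (by omega)
      rw [hL1, loop2_const arr x (n : Int) n (n : Int) 0 le_rfl]
      rw [if_neg (show ¬ (n : Int) = 0 by omega)]
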